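-- pv_equiv track=rewrite | github.com/lucaspy-stack/kpass | passgen.py | pass_generator
-- ===== SOURCE A (Python) =====
-- import itertools
--
-- ciphers = {
--     "A": "4", "a": "4", "Á": "4", "á": "4", "@": "4",
--     "B": "8", "b": "8",
--     "C": "(", "c": "(",
--     "D": "[)", "d": "[)",
--     "E": "3", "e": "3", "É": "3", "é": "3", "&": "3",
--     "F": "#", "f": "#",
--     "G": "6", "g": "6",
--     "H": "#", "h": "#",
--     "I": "1", "i": "1", "Í": "1", "í": "1", "!": "1",
--     "J": "_|", "j": "_|",
--     "K": "|<", "k": "|<",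
--     "L": "1", "l": "1",
--     "M": "/\\/\\", "m": "/\\/\\",
--     "N": "|\\|", "n": "|\\|",
--     "O": "0", "o": "0", "Ó": "0", "ó": "0",
--     "P": "|D", "p": "|D",
--     "Q": "0_", "q": "0_",
--     "R": "12", "r": "12",
--     "S": "$", "s": "$", "Š": "$", "š": "$",
--     "T": "7", "t": "7",
--     "U": "(_)", "u": "(_)",
--     "V": "\\/", "v": "\\/",
--     "W": "\\/\\/", "w": "\\/\\/",
--     "X": "%", "x": "%",
--     "Y": "`/", "y": "`/",
--     "Z": "2", "z": "2"
-- }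
--
-- def aplly_ciphers(text):
--     return ''.join(ciphers.get(char, char) for char in text)
--
-- def pass_generator(name, age, birth_date):
--     day, month, yaer = birth_date.split("/")
--
--     name_tiny = name.lower().replace(" ", "")
--     name_capital = name.upper().replace(" ", "")
--
--     parts_name = name.split()
--     first = parts_name[0]
--     middle = "".join(parts_name[1:-1]) if len(parts_name) > 2 else ""
--     last = parts_name[-1] if len(parts_name) > 1 else ""
--
--     age_reversed  = age[::-1]
--
--     base_combinations = [
--         name_tiny, name_capital, first, middle, last,
--         day, month, yaer,
--         age, age_reversed ,
--         aplly_ciphers(name_tiny), aplly_ciphers(first), aplly_ciphers(last)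
--     ]
--
--     # Remove empty and duplicate strings
--     base_combinations = list(set(filter(lambda x: x.strip() != "", base_combinations)))
--
--     possible_passwords = set()
--
--     # Generates combinations of 2 to 4 base elements
--     for i in range(2, 5):
--         for combo in itertools.permutations(base_combinations, i):
--             password = "".join(combo)
--             if 6 <= len(password) <= 18:
--                 possible_passwords.add(password)
--
--     return list(possible_passwords)
-- ===== SOURCE B (Python) =====
-- # B: parallel-string leet table scanned per char (instead of the dict) and one recursive backtracking
-- # pass with an incremental prefix and length-18 pruning (instead of the per-size
-- # itertools.permutations passes); return value only, same as A's.
--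
-- _KEYS = "AaÁá@BbCcDdEeÉé&FfGgHhIiÍí!JjKkLlMmNnOoÓóPpQqRrSsŠšTtUuVvWwXxYyZz"
-- _VALS = ("4 4 4 4 4 8 8 ( ( [) [) 3 3 3 3 3 # # 6 6 # # 1 1 1 1 1 "
--          "_| _| |< |< 1 1 /\\/\\ /\\/\\ |\\| |\\| 0 0 0 0 |D |D 0_ 0_ "
--          "12 12 $ $ $ $ 7 7 (_) (_) \\/ \\/ \\/\\/ \\/\\/ % % `/ `/ 2 2").split(" ")
--
--
-- def _leet_char(ch):
--     for k, v in zip(_KEYS, _VALS):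
--         if ch == k:
--             return v
--     return ch
--
--
-- def _leet(text):
--     out = ""
--     for ch in text:
--         out += _leet_char(ch)
--     return out
--
--
-- def pass_generator(name, age, birth_date):
--     day, month, yaer = birth_date.split("/")
--
--     name_tiny = name.lower().replace(" ", "")
--     name_capital = name.upper().replace(" ", "")
--
--     first, *rest = name.split()
--     middle = "".join(rest[:-1])
--     last = rest[-1] if rest else ""
--
--     age_reversed = "".join(reversed(age))
--
--     base = list(set(filter(lambda x: x.strip() != "", [
--         name_tiny, name_capital, first, middle, last,
--         day, month, yaer, age, age_reversed,
--         _leet(name_tiny), _leet(first), _leet(last)])))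
--
--     hits = {2: [], 3: [], 4: []}
--
--     def extend(prefix, pool, depth):
--         if len(prefix) > 18:
--             return                      # every completion only gets longer
--         if depth >= 2 and len(prefix) >= 6:
--             hits[depth].append(prefix)
--         if depth == 4:
--             return
--         for i in range(len(pool)):
--             extend(prefix + pool[i], pool[:i] + pool[i + 1:], depth + 1)
--
--     extend("", base, 0)
--     return list(set(hits[2] + hits[3] + hits[4]))
-- ===== Notes on version B (the rewrite author's own statement) =====
-- stated objective: alternative
-- what changed: The dict-driven leet substitution becomes a parallel key-string/value-list table scanned per character, the name parts come from destructuring (first, *rest) instead of index arithmetic, and the per-size itertools.permutations passes become one recursive backtracking pass that extends a prefix incrementally, records it in per-depth hit lists, and prunes a branch as soon as the prefix exceeds 18 characters (safe because extending never shortens the joined string).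
import Mathlib
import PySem

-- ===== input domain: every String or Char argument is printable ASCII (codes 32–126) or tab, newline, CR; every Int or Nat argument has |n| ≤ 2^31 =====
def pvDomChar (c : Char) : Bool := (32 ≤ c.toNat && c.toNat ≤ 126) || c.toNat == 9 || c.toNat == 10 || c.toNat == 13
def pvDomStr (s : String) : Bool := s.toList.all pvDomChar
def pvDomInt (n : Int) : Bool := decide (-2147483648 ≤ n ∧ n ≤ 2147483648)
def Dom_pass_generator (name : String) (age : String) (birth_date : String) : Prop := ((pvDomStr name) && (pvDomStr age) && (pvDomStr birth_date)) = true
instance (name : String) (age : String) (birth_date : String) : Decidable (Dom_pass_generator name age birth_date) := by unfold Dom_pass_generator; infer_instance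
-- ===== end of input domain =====

-- B replaces A's dict-driven leet substitution by a parallel-string table scan and the per-size
-- itertools.permutations passes by one recursive backtracking pass with length pruning;
-- equivalence of the RETURN value is proved.

-- ===== PORT A =====
-- module-level 'ciphers' dict (keys are single-character strings; modelled by their char)
def pvCiphers : PySem.Dict Char String :=
  PySem.Dict.ofList
  [('A', "4"), ('a', "4"), ('Á', "4"), ('á', "4"), ('@', "4"),
   ('B', "8"), ('b', "8"),
   ('C', "("), ('c', "("),
   ('D', "[)"), ('d', "[)"),
   ('E', "3"), ('e', "3"), ('É', "3"), ('é', "3"), ('&', "3"),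
   ('F', "#"), ('f', "#"),
   ('G', "6"), ('g', "6"),
   ('H', "#"), ('h', "#"),
   ('I', "1"), ('i', "1"), ('Í', "1"), ('í', "1"), ('!', "1"),
   ('J', "_|"), ('j', "_|"),
   ('K', "|<"), ('k', "|<"),
   ('L', "1"), ('l', "1"),
   ('M', "/\\/\\"), ('m', "/\\/\\"),
   ('N', "|\\|"), ('n', "|\\|"),
   ('O', "0"), ('o', "0"), ('Ó', "0"), ('ó', "0"),
   ('P', "|D"), ('p', "|D"),
   ('Q', "0_"), ('q', "0_"),
   ('R', "12"), ('r', "12"),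
   ('S', "$"), ('s', "$"), ('Š', "$"), ('š', "$"),
   ('T', "7"), ('t', "7"),
   ('U', "(_)"), ('u', "(_)"),
   ('V', "\\/"), ('v', "\\/"),
   ('W', "\\/\\/"), ('w', "\\/\\/"),
   ('X', "%"), ('x', "%"),
   ('Y', "`/"), ('y', "`/"),
   ('Z', "2"), ('z', "2")]

-- ''.join(ciphers.get(char, char) for char in text)
def pvApllyCiphers (text : String) : String :=
  PySem.Str.join "" (text.toList.map (fun c => (PySem.Dict.get? pvCiphers c).getD (String.ofList [c])))

-- A's preprocessing, line for line, ending in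
-- base_combinations = list(set(filter(lambda x: x.strip() != "", [...])));
-- the getD defaults are reached only outside Pre_, where Python raises
def pvBase (name : String) (age : String) (birth_date : String) : List String :=
  let parts_date := (PySem.Str.split? birth_date "/").getD []
  let day := parts_date.getD 0 ""
  let month := parts_date.getD 1 ""
  let yaer := parts_date.getD 2 ""
  let name_tiny := PySem.Str.replace (PySem.Str.lower name) " " ""
  let name_capital := PySem.Str.replace (PySem.Str.upper name) " " ""
  let parts_name := PySem.Str.split₀ name
  let first := parts_name.getD 0 ""
  let middle := if 2 < parts_name.length then
      PySem.Str.join "" (PySem.List.slice parts_name (some 1) (some (-1))) else ""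
  let last := if 1 < parts_name.length then PySem.List.pyGetD parts_name (-1) "" else ""
  let age_reversed := (PySem.Str.slice? age none none (-1)).getD ""
  PySem.Set.ofList
    (([name_tiny, name_capital, first, middle, last, day, month, yaer, age, age_reversed,
       pvApllyCiphers name_tiny, pvApllyCiphers first, pvApllyCiphers last]).filter
      (fun x => PySem.Str.strip x != ""))

def pass_generator (name : String) (age : String) (birth_date : String) : List String :=
  let base_combinations := pvBase name age birth_date
  (PySem.List.pyRange 2 5 1).foldl (fun possible_passwords i =>
    (PySem.List.permutations base_combinations i.toNat).foldl (fun possible_passwords combo =>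
      let password := PySem.Str.join "" combo
      if 6 ≤ PySem.Str.len password ∧ PySem.Str.len password ≤ 18 then
        PySem.Set.add possible_passwords password
      else possible_passwords) possible_passwords)
    PySem.Set.empty

-- ===== PORT B =====
-- _KEYS / _VALS: the leet table as a key string paired with a value list (Source B)
def pvKeys : List Char :=
  "AaÁá@BbCcDdEeÉé&FfGgHhIiÍí!JjKkLlMmNnOoÓóPpQqRrSsŠšTtUuVvWwXxYyZz".toList

def pvVals : List String :=
  (PySem.Str.split? "4 4 4 4 4 8 8 ( ( [) [) 3 3 3 3 3 # # 6 6 # # 1 1 1 1 1 _| _| |< |< 1 1 /\\/\\ /\\/\\ |\\| |\\| 0 0 0 0 |D |D 0_ 0_ 12 12 $ $ $ $ 7 7 (_) (_) \\/ \\/ \\/\\/ \\/\\/ % % `/ `/ 2 2" " ").getD []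

-- _leet_char: 'for k, v in zip(_KEYS, _VALS): if ch == k: return v' / 'return ch'
def pvScan (ks : List Char) (vs : List String) (ch : Char) : String :=
  match ks, vs with
  | k :: kt, v :: vt => if ch = k then v else pvScan kt vt ch
  | _, _ => String.ofList [ch]

-- _leet: 'out = ""; for ch in text: out += _leet_char(ch)'
def pvLeet (text : String) : String :=
  text.toList.foldl (fun out ch => out ++ pvScan pvKeys pvVals ch) ""

-- the base list of Source B: same list(set(filter(...))) dedup as A, over candidates
-- computed by destructuring, reversed-join and the _leet scan
def pvBaseAlt (name : String) (age : String) (birth_date : String) : List String :=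
  let parts_date := (PySem.Str.split? birth_date "/").getD []
  let day := parts_date.getD 0 ""
  let month := parts_date.getD 1 ""
  let yaer := parts_date.getD 2 ""
  let name_tiny := PySem.Str.replace (PySem.Str.lower name) " " ""
  let name_capital := PySem.Str.replace (PySem.Str.upper name) " " ""
  let parts := PySem.Str.split₀ name          -- first, *rest = name.split()
  let first := parts.headD ""
  let rest := parts.tail
  let middle := PySem.Str.join "" rest.dropLast
  let last := if rest.isEmpty then "" else rest.getLastD ""
  let age_reversed := String.ofList age.toList.reverse    -- "".join(reversed(age))
  PySem.Set.ofList
    (([name_tiny, name_capital, first, middle, last, day, month, yaer, age, age_reversed,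
       pvLeet name_tiny, pvLeet first, pvLeet last]).filter
      (fun x => PySem.Str.strip x != ""))

-- hits[2], hits[3], hits[4] of Source B are the three components of the accumulator triple
def pvExtend (pfx : String) (pool : List String) (depth : Nat)
    (hits : List String × List String × List String) :
    List String × List String × List String :=
  if 18 < PySem.Str.len pfx then hits
  else
    let hits1 := if 2 ≤ depth ∧ 6 ≤ PySem.Str.len pfx then
        (match depth with
         | 2 => (hits.1 ++ [pfx], hits.2.1, hits.2.2)
         | 3 => (hits.1, hits.2.1 ++ [pfx], hits.2.2)
         | _ => (hits.1, hits.2.1, hits.2.2 ++ [pfx]))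
      else hits
    if depth = 4 then hits1
    else (List.range pool.length).foldl (fun a i =>
        if h : i < pool.length then
          pvExtend (pfx ++ pool[i]) (pool.eraseIdx i) (depth + 1) a
        else a) hits1
termination_by pool.length
decreasing_by simp [List.length_eraseIdx, h]; omega

def pass_generator_alt (name : String) (age : String) (birth_date : String) : List String :=
  let base := pvBaseAlt name age birth_date
  let hits := pvExtend "" base 0 ([], [], [])
  PySem.Set.ofList (hits.1 ++ hits.2.1 ++ hits.2.2)

-- ===== PRECONDITION & SPEC =====
-- exactly where Python A returns: name has a non-whitespace character (else parts_name[0]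
-- raises IndexError) and birth_date splits on "/" into exactly 3 pieces (else the unpack raises)
def Pre_pass_generator (name : String) (age : String) (birth_date : String) : Prop :=
  PySem.Str.split₀ name ≠ [] ∧ ((PySem.Str.split? birth_date "/").getD []).length = 3
instance (name : String) (age : String) (birth_date : String) : Decidable (Pre_pass_generator name age birth_date) := by unfold Pre_pass_generator; infer_instance

def pvWitness_pass_generator : String × String × String := ("ana maria silva", "30", "1/2/1990")

def Spec_pass_generator (name : String) (age : String) (birth_date : String) (out : List String) : Prop := out = pass_generator_alt name age birth_date
instance (name : String) (age : String) (birth_date : String) (out : List String) : Decidable (Spec_pass_generator name age birth_date out) := by unfold Spec_pass_generator; infer_instance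

-- ===== CLAIM (what is proved, stated in full; the proofs are below) =====
def Claim_equal_pass_generator : Prop := ∀ (name : String) (age : String) (birth_date : String), Dom_pass_generator name age birth_date → Pre_pass_generator name age birth_date → Spec_pass_generator name age birth_date (pass_generator name age birth_date)

-- ===== LEMMAS AND PROOFS =====

-- the cipher table as a plain pair list: A's dict is Dict.mk of it, B's parallel
-- strings are its two projections (all three checked by the kernel)
def pvCipherList : List (Char × String) :=
  [('A', "4"), ('a', "4"), ('Á', "4"), ('á', "4"), ('@', "4"),
   ('B', "8"), ('b', "8"),
   ('C', "("), ('c', "("),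
   ('D', "[)"), ('d', "[)"),
   ('E', "3"), ('e', "3"), ('É', "3"), ('é', "3"), ('&', "3"),
   ('F', "#"), ('f', "#"),
   ('G', "6"), ('g', "6"),
   ('H', "#"), ('h', "#"),
   ('I', "1"), ('i', "1"), ('Í', "1"), ('í', "1"), ('!', "1"),
   ('J', "_|"), ('j', "_|"),
   ('K', "|<"), ('k', "|<"),
   ('L', "1"), ('l', "1"),
   ('M', "/\\/\\"), ('m', "/\\/\\"),
   ('N', "|\\|"), ('n', "|\\|"),
   ('O', "0"), ('o', "0"), ('Ó', "0"), ('ó', "0"),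
   ('P', "|D"), ('p', "|D"),
   ('Q', "0_"), ('q', "0_"),
   ('R', "12"), ('r', "12"),
   ('S', "$"), ('s', "$"), ('Š', "$"), ('š', "$"),
   ('T', "7"), ('t', "7"),
   ('U', "(_)"), ('u', "(_)"),
   ('V', "\\/"), ('v', "\\/"),
   ('W', "\\/\\/"), ('w', "\\/\\/"),
   ('X', "%"), ('x', "%"),
   ('Y', "`/"), ('y', "`/"),
   ('Z', "2"), ('z', "2")]

set_option maxRecDepth 4000 in
theorem pvCiphers_eq_mk : pvCiphers = PySem.Dict.mk pvCipherList := by decide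

set_option maxRecDepth 4000 in
theorem pvKeys_eq : pvKeys = pvCipherList.map Prod.fst := by decide

set_option maxRecDepth 8000 in
theorem pvVals_eq : pvVals = pvCipherList.map Prod.snd := by decide

-- the zip scan of Source B is the assoc-list lookup of A's dict
theorem pv_scan_mk (L : List (Char × String)) (c : Char) :
    pvScan (L.map Prod.fst) (L.map Prod.snd) c
      = ((PySem.Dict.mk L).get? c).getD (String.ofList [c]) := by
  induction L with
  | nil => simp [pvScan, PySem.Dict.get?]
  | cons p t ih =>
      obtain ⟨k, v⟩ := p
      rw [List.map_cons, List.map_cons, PySem.Dict.get?_mk_cons]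
      by_cases h : c = k
      · simp [pvScan, h]
      · have : (k == c) = false := by exact beq_eq_false_iff_ne.mpr fun e => h e.symm
        simp [pvScan, h, this, ih]

theorem pv_scan_eq (c : Char) :
    pvScan pvKeys pvVals c = (PySem.Dict.get? pvCiphers c).getD (String.ofList [c]) := by
  rw [pvKeys_eq, pvVals_eq, pvCiphers_eq_mk, pv_scan_mk]

theorem pv_join_nil : PySem.Str.join "" ([] : List String) = "" := by
  rw [← String.toList_inj]; simp [PySem.Str.toList_join, PySem.Chars.join_nil]

theorem pv_join_cons (x : String) (p : List String) :
    PySem.Str.join "" (x :: p) = x ++ PySem.Str.join "" p := by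
  rw [← String.toList_inj]
  cases p with
  | nil => simp [PySem.Str.toList_join, PySem.Chars.join_singleton, PySem.Chars.join_nil,
      String.toList_append]
  | cons y r =>
      simp [PySem.Str.toList_join, PySem.Chars.join_cons_cons, String.toList_append]

-- Source B's 'out += _leet_char(ch)' loop is A's join-of-map
theorem pv_leet_fold (l : List Char) : ∀ (acc : String),
    l.foldl (fun out ch => out ++ pvScan pvKeys pvVals ch) acc
      = acc ++ PySem.Str.join "" (l.map (fun c => (PySem.Dict.get? pvCiphers c).getD (String.ofList [c]))) := by
  induction l with
  | nil => intro acc; simp [pv_join_nil]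
  | cons c t ih =>
      intro acc
      simp only [List.foldl_cons]
      rw [ih, pv_scan_eq, List.map_cons, pv_join_cons, String.append_assoc]

theorem pv_leet_eq (t : String) : pvLeet t = pvApllyCiphers t := by
  rw [pvLeet, pvApllyCiphers, pv_leet_fold]
  simp

-- first, middle, last of the destructuring form equal A's indexed form
theorem pv_first_eq (parts : List String) : parts.headD "" = parts.getD 0 "" := by
  cases parts <;> rfl

theorem pv_slice_one_neg_one (xs : List String) :
    PySem.List.slice xs (some 1) (some (-1)) = xs.tail.dropLast := by
  simp only [PySem.List.slice, PySem.List.clampIdx_neg_one]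
  cases xs with
  | nil => simp
  | cons x t => simp [List.dropLast_eq_take]

theorem pv_middle_eq (parts : List String) :
    (if 2 < parts.length then
        PySem.Str.join "" (PySem.List.slice parts (some 1) (some (-1))) else "")
      = PySem.Str.join "" parts.tail.dropLast := by
  by_cases h : 2 < parts.length
  · rw [if_pos h, pv_slice_one_neg_one]
  · rw [if_neg h]
    have ht : parts.tail.dropLast = [] := by
      match parts, h with
      | [], _ => rfl
      | [x], _ => rfl
      | [x, y], _ => rfl
      | x :: y :: z :: t, h => exact absurd (by simp) h
    rw [ht, pv_join_nil]

theorem pv_last_eq (parts : List String) :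
    (if 1 < parts.length then PySem.List.pyGetD parts (-1) "" else "")
      = (if parts.tail.isEmpty then "" else parts.tail.getLastD "") := by
  match parts with
  | [] => rfl
  | [x] => rfl
  | x :: y :: t =>
      rw [if_pos (by simp), if_neg (by simp)]
      have h := PySem.List.pyGetD_neg_one (x :: y :: t) "" (by simp)
      rw [h, List.getLast_cons (by simp), List.getLastD_eq_getLast?,
        List.getLast?_eq_some_getLast (by simp)]
      rfl

theorem pv_age_eq (a : String) :
    String.ofList a.toList.reverse = (PySem.Str.slice? a none none (-1)).getD "" := by
  rw [PySem.Str.slice?_none_none_neg_one]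
  rfl

-- the whole base list agrees
theorem pv_base_alt_eq (name age birth_date : String) :
    pvBaseAlt name age birth_date = pvBase name age birth_date := by
  unfold pvBaseAlt pvBase
  simp only [pv_leet_eq, pv_first_eq, pv_middle_eq, pv_last_eq, ← pv_age_eq]

-- the strings a depth-d node of B's search contributes, described through A's permutations
def pvJoins (pre : String) (pool : List String) (r : Nat) : List String :=
  ((PySem.List.permutations pool r).map (fun c => pre ++ PySem.Str.join "" c)).filter
    (fun pw => decide (6 ≤ PySem.Str.len pw) && decide (PySem.Str.len pw ≤ 18))

-- one unfolding step of PySem.List.permutations, with the in-range index made explicit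
theorem pv_perms_succ {α : Type} (xs : List α) (r : Nat) :
    PySem.List.permutations xs (r + 1) =
      (List.range xs.length).flatMap (fun i =>
        if h : i < xs.length then
          (PySem.List.permutations (xs.eraseIdx i) r).map (xs[i] :: ·)
        else []) := by
  rw [PySem.List.permutations]
  apply List.flatMap_congr
  intro i hi
  rw [List.mem_range] at hi
  simp [hi]

theorem pvJoins_zero (pre : String) (pool : List String) :
    pvJoins pre pool 0 =
      if 6 ≤ PySem.Str.len pre ∧ PySem.Str.len pre ≤ 18 then [pre] else [] := by
  simp only [pvJoins, PySem.List.permutations, List.map, pv_join_nil, String.append_empty,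
    List.filter_singleton]
  rw [← Bool.decide_and]
  rw [Bool.cond_decide]

theorem pvJoins_succ (pre : String) (pool : List String) (r : Nat) :
    pvJoins pre pool (r + 1) =
      (List.range pool.length).flatMap (fun i =>
        if h : i < pool.length then pvJoins (pre ++ pool[i]) (pool.eraseIdx i) r
        else []) := by
  rw [pvJoins, pv_perms_succ]
  rw [List.map_flatMap, List.filter_flatMap]
  apply List.flatMap_congr
  intro i hi
  rw [List.mem_range] at hi
  simp only [hi, dif_pos, List.map_map, pvJoins]
  congr 1
  apply List.map_congr_left
  intro c _
  simp [Function.comp, pv_join_cons, String.append_assoc]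

-- the pruning is sound: a prefix longer than 18 only grows
theorem pvJoins_of_long (pre : String) (pool : List String) (r : Nat)
    (h : 18 < PySem.Str.len pre) : pvJoins pre pool r = [] := by
  rw [pvJoins, List.filter_eq_nil_iff]
  intro pw hpw
  rw [List.mem_map] at hpw
  obtain ⟨c, _, rfl⟩ := hpw
  have hlen : PySem.Str.len pre ≤ PySem.Str.len (pre ++ PySem.Str.join "" c) := by
    rw [PySem.Str.len_append]
    have := PySem.Str.len_eq (PySem.Str.join "" c)
    omega
  simp only [Bool.and_eq_true, decide_eq_true_eq]
  omega

theorem pv_child_flat (pool : List String) (pre : String) (depth d : Nat)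
    (hguard : depth + 1 ≤ d) :
    (List.range pool.length).flatMap (fun i => if h : i < pool.length then
        (if depth + 1 ≤ d then pvJoins (pre ++ pool[i]) (pool.eraseIdx i) (d - (depth + 1)) else [])
      else [])
    = pvJoins pre pool (d - depth) := by
  rw [show d - depth = (d - (depth + 1)) + 1 by omega, pvJoins_succ]
  apply List.flatMap_congr
  intro i hi
  rw [List.mem_range] at hi
  simp [hi, hguard]

theorem pv_child_flat_none (pool : List String) (pre : String) (depth d : Nat)
    (hguard : ¬ depth + 1 ≤ d) :
    (List.range pool.length).flatMap (fun i => if h : i < pool.length then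
        (if depth + 1 ≤ d then pvJoins (pre ++ pool[i]) (pool.eraseIdx i) (d - (depth + 1)) else [])
      else [])
    = [] := by
  simp [hguard]

-- the backtracking search collects, per bucket d, exactly the admissible joined
-- d-element selections A's permutations enumerate
theorem pvExtend_spec : ∀ (n : Nat) (pool : List String), pool.length = n →
    ∀ (pre : String) (depth : Nat) (b2 b3 b4 : List String), depth ≤ 4 →
    pvExtend pre pool depth (b2, b3, b4) =
      (b2 ++ (if depth ≤ 2 then pvJoins pre pool (2 - depth) else []),
       b3 ++ (if depth ≤ 3 then pvJoins pre pool (3 - depth) else []),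
       b4 ++ pvJoins pre pool (4 - depth)) := by
  intro n
  induction n using Nat.strong_induction_on with
  | _ n IH =>
    intro pool hlen pre depth b2 b3 b4 hdepth
    rw [pvExtend.eq_def]
    by_cases hlong : 18 < PySem.Str.len pre
    · rw [if_pos hlong, pvJoins_of_long _ _ _ hlong, pvJoins_of_long _ _ _ hlong,
        pvJoins_of_long _ _ _ hlong]
      simp
    · rw [if_neg hlong]
      have hle18 : PySem.Str.len pre ≤ 18 := le_of_not_gt hlong
      have hfold : ∀ (l : List Nat), (∀ i ∈ l, i < pool.length) → depth ≠ 4 →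
          ∀ (c2 c3 c4 : List String),
          l.foldl (fun a i =>
            if h : i < pool.length then
              pvExtend (pre ++ pool[i]) (pool.eraseIdx i) (depth + 1) a
            else a) (c2, c3, c4) =
          (c2 ++ l.flatMap (fun i => if h : i < pool.length then
              (if depth + 1 ≤ 2 then pvJoins (pre ++ pool[i]) (pool.eraseIdx i) (2 - (depth + 1)) else []) else []),
           c3 ++ l.flatMap (fun i => if h : i < pool.length then
              (if depth + 1 ≤ 3 then pvJoins (pre ++ pool[i]) (pool.eraseIdx i) (3 - (depth + 1)) else []) else []),
           c4 ++ l.flatMap (fun i => if h : i < pool.length then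
              (if depth + 1 ≤ 4 then pvJoins (pre ++ pool[i]) (pool.eraseIdx i) (4 - (depth + 1)) else []) else [])) := by
        intro l
        induction l with
        | nil => intro _ _ c2 c3 c4; simp
        | cons i t iht =>
          intro hmem hne c2 c3 c4
          have hi : i < pool.length := hmem i (by simp)
          have herase : (pool.eraseIdx i).length < n := by
            rw [List.length_eraseIdx]; simp [hi]; omega
          have hd1 : depth + 1 ≤ 4 := by omega
          have hrec := IH _ herase (pool.eraseIdx i) rfl (pre ++ pool[i]) (depth + 1) c2 c3 c4 hd1
          simp only [List.foldl_cons, dif_pos hi]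
          rw [hrec, iht (fun j hj => hmem j (by simp [hj])) hne]
          simp only [List.flatMap_cons, dif_pos hi, if_pos hd1, List.append_assoc]
      interval_cases depth
      · -- depth = 0
        rw [if_neg (by omega)]
        rw [hfold _ (fun i hi => List.mem_range.mp hi) (by omega)]
        rw [pv_child_flat pool pre 0 2 (by omega), pv_child_flat pool pre 0 3 (by omega),
          pv_child_flat pool pre 0 4 (by omega)]
        simp
      · -- depth = 1
        rw [if_neg (show ¬((2:Nat) ≤ 1 ∧ 6 ≤ PySem.Str.len pre) from fun h => by omega)]
        rw [if_neg (show (1:Nat) ≠ 4 by omega)]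
        rw [hfold _ (fun i hi => List.mem_range.mp hi) (by omega)]
        rw [pv_child_flat pool pre 1 2 (by omega), pv_child_flat pool pre 1 3 (by omega),
          pv_child_flat pool pre 1 4 (by omega)]
        simp
      · -- depth = 2
        by_cases hc6 : 6 ≤ PySem.Str.len pre
        · simp only [if_pos (show (2:Nat) ≤ 2 ∧ 6 ≤ PySem.Str.len pre from ⟨le_refl _, hc6⟩)]
          rw [if_neg (show (2:Nat) ≠ 4 by omega)]
          rw [hfold _ (fun i hi => List.mem_range.mp hi) (by omega)]
          rw [pv_child_flat_none pool pre 2 2 (by omega), pv_child_flat pool pre 2 3 (by omega),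
            pv_child_flat pool pre 2 4 (by omega)]
          rw [show (2:Nat) - 2 = 0 from rfl, pvJoins_zero,
            if_pos (show 6 ≤ PySem.Str.len pre ∧ PySem.Str.len pre ≤ 18 from ⟨hc6, hle18⟩)]
          simp
        · rw [if_neg (show ¬((2:Nat) ≤ 2 ∧ 6 ≤ PySem.Str.len pre) from fun h => hc6 h.2)]
          rw [if_neg (show (2:Nat) ≠ 4 by omega)]
          rw [hfold _ (fun i hi => List.mem_range.mp hi) (by omega)]
          rw [pv_child_flat_none pool pre 2 2 (by omega), pv_child_flat pool pre 2 3 (by omega),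
            pv_child_flat pool pre 2 4 (by omega)]
          rw [show (2:Nat) - 2 = 0 from rfl, pvJoins_zero,
            if_neg (show ¬(6 ≤ PySem.Str.len pre ∧ PySem.Str.len pre ≤ 18) from fun h => hc6 h.1)]
          simp
      · -- depth = 3
        by_cases hc6 : 6 ≤ PySem.Str.len pre
        · simp only [if_pos (show (2:Nat) ≤ 3 ∧ 6 ≤ PySem.Str.len pre from ⟨by omega, hc6⟩)]
          rw [if_neg (show (3:Nat) ≠ 4 by omega)]
          rw [hfold _ (fun i hi => List.mem_range.mp hi) (by omega)]
          rw [pv_child_flat_none pool pre 3 2 (by omega), pv_child_flat_none pool pre 3 3 (by omega),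
            pv_child_flat pool pre 3 4 (by omega)]
          rw [show (3:Nat) - 3 = 0 from rfl, pvJoins_zero,
            if_pos (show 6 ≤ PySem.Str.len pre ∧ PySem.Str.len pre ≤ 18 from ⟨hc6, hle18⟩)]
          simp [show ¬((3:Nat) ≤ 2) by omega]
        · rw [if_neg (show ¬((2:Nat) ≤ 3 ∧ 6 ≤ PySem.Str.len pre) from fun h => hc6 h.2)]
          rw [if_neg (show (3:Nat) ≠ 4 by omega)]
          rw [hfold _ (fun i hi => List.mem_range.mp hi) (by omega)]
          rw [pv_child_flat_none pool pre 3 2 (by omega), pv_child_flat_none pool pre 3 3 (by omega),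
            pv_child_flat pool pre 3 4 (by omega)]
          rw [show (3:Nat) - 3 = 0 from rfl, pvJoins_zero,
            if_neg (show ¬(6 ≤ PySem.Str.len pre ∧ PySem.Str.len pre ≤ 18) from fun h => hc6 h.1)]
          simp [show ¬((3:Nat) ≤ 2) by omega]
      · -- depth = 4
        rw [if_pos rfl]
        by_cases hc6 : 6 ≤ PySem.Str.len pre
        · simp only [if_pos (show (2:Nat) ≤ 4 ∧ 6 ≤ PySem.Str.len pre from ⟨by omega, hc6⟩)]
          rw [show (4:Nat) - 4 = 0 from rfl, pvJoins_zero,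
            if_pos (show 6 ≤ PySem.Str.len pre ∧ PySem.Str.len pre ≤ 18 from ⟨hc6, hle18⟩)]
          simp [show ¬((4:Nat) ≤ 2) by omega, show ¬((4:Nat) ≤ 3) by omega]
        · rw [if_neg (show ¬((2:Nat) ≤ 4 ∧ 6 ≤ PySem.Str.len pre) from fun h => hc6 h.2)]
          rw [show (4:Nat) - 4 = 0 from rfl, pvJoins_zero,
            if_neg (show ¬(6 ≤ PySem.Str.len pre ∧ PySem.Str.len pre ≤ 18) from fun h => hc6 h.1)]
          simp [show ¬((4:Nat) ≤ 2) by omega, show ¬((4:Nat) ≤ 3) by omega]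

-- A's conditional set-insertion fold is the plain insertion fold of the filtered joins
theorem pv_foldl_add_filter (l : List (List String)) (s : PySem.Set String) :
    l.foldl (fun possible_passwords combo =>
      let password := PySem.Str.join "" combo
      if 6 ≤ PySem.Str.len password ∧ PySem.Str.len password ≤ 18 then
        PySem.Set.add possible_passwords password
      else possible_passwords) s
    = List.foldl PySem.Set.add s
        ((l.map (fun c => PySem.Str.join "" c)).filter
          (fun pw => decide (6 ≤ PySem.Str.len pw) && decide (PySem.Str.len pw ≤ 18))) := by
  induction l generalizing s with
  | nil => rfl
  | cons c t ih =>
    simp only [List.foldl_cons, List.map_cons, List.filter_cons]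
    by_cases h : 6 ≤ PySem.Str.len (PySem.Str.join "" c) ∧ PySem.Str.len (PySem.Str.join "" c) ≤ 18
    · rw [if_pos h, if_pos (by simpa using h)]
      simp only [List.foldl_cons]
      exact ih _
    · rw [if_neg h, if_neg (by simpa using h)]
      exact ih _

theorem pvJoins_empty_pre (pool : List String) (r : Nat) :
    pvJoins "" pool r =
      ((PySem.List.permutations pool r).map (fun c => PySem.Str.join "" c)).filter
        (fun pw => decide (6 ≤ PySem.Str.len pw) && decide (PySem.Str.len pw ≤ 18)) := by
  simp only [pvJoins, String.empty_append]

theorem pv_main (base : List String) :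
    (PySem.List.pyRange 2 5 1).foldl (fun possible_passwords i =>
      (PySem.List.permutations base i.toNat).foldl (fun possible_passwords combo =>
        let password := PySem.Str.join "" combo
        if 6 ≤ PySem.Str.len password ∧ PySem.Str.len password ≤ 18 then
          PySem.Set.add possible_passwords password
        else possible_passwords) possible_passwords)
      PySem.Set.empty
    = (fun hits => PySem.Set.ofList (hits.1 ++ hits.2.1 ++ hits.2.2))
        (pvExtend "" base 0 ([], [], [])) := by
  rw [show PySem.List.pyRange 2 5 1 = [(2:Int), 3, 4] from by decide]
  simp only [List.foldl_cons, List.foldl_nil]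
  rw [pv_foldl_add_filter, pv_foldl_add_filter, pv_foldl_add_filter]
  rw [pvExtend_spec base.length base rfl "" 0 [] [] [] (by omega)]
  simp only [Nat.sub_zero, Nat.zero_le, if_pos, List.nil_append]
  rw [pvJoins_empty_pre, pvJoins_empty_pre, pvJoins_empty_pre]
  rw [PySem.Set.ofList_eq_foldl, List.foldl_append, List.foldl_append]
  rfl

-- ===== VERDICT (by name: the statement is the Claim_ definition above) =====
theorem pass_generator_spec : Claim_equal_pass_generator := by
  intro name age birth_date _ _
  unfold Spec_pass_generator pass_generator pass_generator_alt
  rw [pv_base_alt_eq]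
  exact pv_main (pvBase name age birth_date)
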